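-- pv_equiv track=rewrite | github.com/rayz1065/competitive-programming | leetcode/expression-add-operators/main.py | has_leading_zeros
-- ===== SOURCE A (Python) =====
-- def has_leading_zeros(operation):
--     number = ""
--     for op in operation:
--         if op.isdigit():
--             number += op
--             if number.startswith("0") and len(number) > 1:
--                 return True
--         else:
--             number = ""
--
--     return False
-- ===== SOURCE B (Python) =====
-- def has_leading_zeros(operation):
--     # Two-phase: split the string into maximal digit runs, then inspect whole tokens.
--     runs = []
--     cur = ""
--     for ch in operation:
--         if ch.isdigit():
--             cur += ch
--         else:
--             if cur:
--                 runs.append(cur)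
--             cur = ""
--     if cur:
--         runs.append(cur)
--     return any(r[0] == "0" and len(r) > 1 for r in runs)
-- ===== Notes on version B (the rewrite author's own statement) =====
-- stated objective: alternative
-- what changed: B first partitions the string into maximal digit runs and then tests each whole token for a leading zero, instead of A's incremental character-by-character accumulator with an early return inside the scan.
import Mathlib
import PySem

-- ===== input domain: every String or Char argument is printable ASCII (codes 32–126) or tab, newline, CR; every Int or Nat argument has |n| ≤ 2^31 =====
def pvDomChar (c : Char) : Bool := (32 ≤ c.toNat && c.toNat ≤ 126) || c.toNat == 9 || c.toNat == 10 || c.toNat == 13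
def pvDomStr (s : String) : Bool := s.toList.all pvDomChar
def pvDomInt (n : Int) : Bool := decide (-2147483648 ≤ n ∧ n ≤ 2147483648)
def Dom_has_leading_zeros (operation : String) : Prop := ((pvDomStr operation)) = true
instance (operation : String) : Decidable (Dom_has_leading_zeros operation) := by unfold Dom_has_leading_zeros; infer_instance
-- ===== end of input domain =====

-- B splits the string into maximal digit runs and tests whole tokens for a leading zero,
-- instead of A's incremental per-character accumulator with early return; proved equal.


-- ===== PORT A =====
-- loop over the characters with the accumulated digit string `number`; early return becomes `true`
def hlzGoA : List Char → List Char → Bool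
  | [], _ => false
  | c :: rest, number =>
    if PySem.Chars.isdigit c then
      -- number += op, then the startswith/len check (inlined)
      if (number ++ [c]).head? == some '0' && decide ((number ++ [c]).length > 1) then true
      else hlzGoA rest (number ++ [c])
    else hlzGoA rest []

def has_leading_zeros (operation : String) : Bool := hlzGoA operation.toList []

-- ===== PORT B =====
-- phase 1 of Source B: the loop collecting maximal digit runs (runs, cur are the two accumulators)
def hlzRuns : List Char → List (List Char) → List Char → List (List Char)
  | [], runs, cur => if cur.isEmpty then runs else runs ++ [cur]
  | c :: rest, runs, cur =>
    if PySem.Chars.isdigit c then hlzRuns rest runs (cur ++ [c])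
    else hlzRuns rest (if cur.isEmpty then runs else runs ++ [cur]) []

-- Source B's predicate `r[0] == "0" and len(r) > 1`; r is always nonempty, so r[0] is `head?` (exact)
def hlzBadRun (r : List Char) : Bool := r.head? == some '0' && decide (r.length > 1)

def has_leading_zeros_alt (operation : String) : Bool :=
  (hlzRuns operation.toList [] []).any hlzBadRun

-- ===== PRECONDITION & SPEC =====
def Spec_has_leading_zeros (operation : String) (out : Bool) : Prop := out = has_leading_zeros_alt operation
instance (operation : String) (out : Bool) : Decidable (Spec_has_leading_zeros operation out) := by unfold Spec_has_leading_zeros; infer_instance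

-- ===== CLAIM (what is proved, stated in full; the proofs are below) =====
def Claim_equal_has_leading_zeros : Prop := ∀ (operation : String), Dom_has_leading_zeros operation → Spec_has_leading_zeros operation (has_leading_zeros operation)

-- ===== LEMMAS AND PROOFS =====

-- the `runs` accumulator only ever receives appends: it factors out
theorem hlzRuns_acc (l : List Char) : ∀ (runs : List (List Char)) (cur : List Char),
    hlzRuns l runs cur = runs ++ hlzRuns l [] cur := by
  induction l with
  | nil =>
    intro runs cur
    by_cases h : cur.isEmpty <;> simp [hlzRuns, h]
  | cons c rest ih =>
    intro runs cur
    by_cases hd : PySem.Chars.isdigit c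
    · simp only [hlzRuns, hd, if_true]
      exact ih runs (cur ++ [c])
    · simp only [hlzRuns, hd, Bool.false_eq_true, if_false]
      by_cases h : cur.isEmpty
      · simp only [h, if_true]
        exact ih runs []
      · simp only [h, Bool.false_eq_true, if_false]
        rw [ih (runs ++ [cur]) [], ih ([] ++ [cur]) []]
        simp

-- once the current run is already bad, the finished run containing it is bad
theorem hlzRuns_bad (l : List Char) : ∀ (cur : List Char), cur ≠ [] → hlzBadRun cur = true →
    (hlzRuns l [] cur).any hlzBadRun = true := by
  induction l with
  | nil =>
    intro cur hne hb
    obtain ⟨x, xs, rfl⟩ := List.exists_cons_of_ne_nil hne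
    simp [hlzRuns, hb]
  | cons c rest ih =>
    intro cur hne hb
    obtain ⟨x, xs, rfl⟩ := List.exists_cons_of_ne_nil hne
    by_cases hd : PySem.Chars.isdigit c
    · simp only [hlzRuns, hd, if_true]
      refine ih _ (by simp) ?_
      simp [hlzBadRun] at hb ⊢
      exact hb.1
    · simp only [hlzRuns, hd, Bool.false_eq_true, if_false, List.isEmpty_cons, List.nil_append]
      rw [hlzRuns_acc, List.any_append]
      simp [hb]

-- main invariant: while the accumulated run is not yet bad, A's scan equals
-- "some finished run (of the rest, continuing cur) is bad"
theorem hlz_main (l : List Char) : ∀ (cur : List Char), hlzBadRun cur = false →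
    hlzGoA l cur = (hlzRuns l [] cur).any hlzBadRun := by
  induction l with
  | nil =>
    intro cur hok
    by_cases h : cur.isEmpty <;> simp [hlzGoA, hlzRuns, h, hok]
  | cons c rest ih =>
    intro cur hok
    by_cases hd : PySem.Chars.isdigit c
    · simp only [hlzGoA, hlzRuns, hd, if_true]
      rw [show ((cur ++ [c]).head? == some '0' && decide ((cur ++ [c]).length > 1))
            = hlzBadRun (cur ++ [c]) from rfl]
      cases hb : hlzBadRun (cur ++ [c]) with
      | true =>
        simp only [if_true]
        exact (hlzRuns_bad rest (cur ++ [c]) (by simp) hb).symm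
      | false =>
        simp only [Bool.false_eq_true, if_false]
        exact ih (cur ++ [c]) hb
    · simp only [hlzGoA, hlzRuns, hd, Bool.false_eq_true, if_false]
      rw [hlzRuns_acc, List.any_append, ih [] (by simp [hlzBadRun])]
      by_cases h : cur.isEmpty <;> simp [h, hok]

-- ===== VERDICT (by name: the statement is the Claim_ definition above) =====
theorem has_leading_zeros_spec : Claim_equal_has_leading_zeros := by
  intro operation _
  unfold Spec_has_leading_zeros has_leading_zeros has_leading_zeros_alt
  exact hlz_main operation.toList [] (by simp [hlzBadRun])
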